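-- pv_equiv track=rewrite | github.com/tonghien22890/sam_trainer | archive_old_solutions/enhanced_pipeline_model.py | analyze_hand_combos
-- ===== SOURCE A (Python) =====
-- from typing import Dict, List, Any, Tuple
--
-- def analyze_hand_combos(hand: List[int]) -> Dict[str, int]:
--     """Analyze combos available in hand"""
--     combo_counts = {
--         "single": 0,
--         "pair": 0,
--         "triple": 0,
--         "four_kind": 0,
--         "straight": 0,
--         "double_seq": 0
--     }
--
--     # Count ranks
--     rank_counts = {}
--     for card_id in hand:
--         if 0 <= card_id < 52:
--             rank = card_id % 13
--             rank_counts[rank] = rank_counts.get(rank, 0) + 1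
--
--     # Count combos
--     for rank, count in rank_counts.items():
--         if count >= 1:
--             combo_counts["single"] += 1
--         if count >= 2:
--             combo_counts["pair"] += 1
--         if count >= 3:
--             combo_counts["triple"] += 1
--         if count >= 4:
--             combo_counts["four_kind"] += 1
--
--     # Check for straights (simplified)
--     ranks = sorted(rank_counts.keys())
--     for i in range(len(ranks) - 4):
--         if ranks[i+4] - ranks[i] == 4:  # 5 consecutive ranks
--             combo_counts["straight"] += 1
--             break
--
--     return combo_counts
-- ===== SOURCE B (Python) =====
-- def analyze_hand_combos(hand):
--     """Analyze combos available in hand (fixed 13-slot rank table, no dict/sort)."""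
--     cnt = [sum(1 for c in hand if 0 <= c < 52 and c % 13 == r) for r in range(13)]
--
--     def at_least(t):
--         return sum(1 for v in cnt if v >= t)
--
--     straight = 1 if any(all(cnt[r + k] > 0 for k in range(5)) for r in range(9)) else 0
--     return {
--         "single": at_least(1),
--         "pair": at_least(2),
--         "triple": at_least(3),
--         "four_kind": at_least(4),
--         "straight": straight,
--         "double_seq": 0,
--     }
-- ===== Notes on version B (the rewrite author's own statement) =====
-- stated objective: idiomatic
-- what changed: Replaces the rank-count dict plus sort-and-slide straight detection with a fixed 13-slot count table; combo counts are threshold sums over the table and a straight is found by testing the nine possible starting ranks for membership of five consecutive counted ranks.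
import Mathlib
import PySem

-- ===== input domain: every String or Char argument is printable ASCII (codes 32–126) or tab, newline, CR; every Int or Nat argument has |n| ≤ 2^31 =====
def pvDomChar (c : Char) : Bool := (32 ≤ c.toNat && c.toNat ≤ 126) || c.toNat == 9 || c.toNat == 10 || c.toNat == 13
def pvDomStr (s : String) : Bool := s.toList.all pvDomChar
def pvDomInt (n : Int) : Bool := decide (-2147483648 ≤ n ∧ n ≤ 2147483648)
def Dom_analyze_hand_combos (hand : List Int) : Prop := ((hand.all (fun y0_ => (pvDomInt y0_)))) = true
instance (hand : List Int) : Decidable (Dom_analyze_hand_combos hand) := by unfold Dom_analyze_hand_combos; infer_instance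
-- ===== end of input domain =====

-- B replaces A's rank-count dict and sort-plus-adjacency straight scan by a fixed 13-slot count
-- table with threshold sums and a membership test over the nine possible straight starts (objective: idiomatic).

-- ===== PORT A =====
def pvComboStep (d : PySem.Dict String Int) (pr : Int × Int) : PySem.Dict String Int :=
  let d1 := if pr.2 ≥ 1 then d.insert "single" (d.getD "single" 0 + 1) else d
  let d2 := if pr.2 ≥ 2 then d1.insert "pair" (d1.getD "pair" 0 + 1) else d1
  let d3 := if pr.2 ≥ 3 then d2.insert "triple" (d2.getD "triple" 0 + 1) else d2
  if pr.2 ≥ 4 then d3.insert "four_kind" (d3.getD "four_kind" 0 + 1) else d3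

def pvStraightLoop (ranks : List Int) : List Int → PySem.Dict String Int → PySem.Dict String Int
  | [], d => d
  | i :: rest, d =>
      if PySem.List.pyGetD ranks (i+4) 0 - PySem.List.pyGetD ranks i 0 = 4 then
        d.insert "straight" (d.getD "straight" 0 + 1)
      else pvStraightLoop ranks rest d

def analyze_hand_combos (hand : List Int) : List (String × Int) :=
  let combo0 : PySem.Dict String Int :=
    PySem.Dict.ofList [("single",0),("pair",0),("triple",0),("four_kind",0),("straight",0),("double_seq",0)]
  let rank_counts := hand.foldl (fun d c =>
      if 0 ≤ c ∧ c < 52 then d.insert (PySem.Int.mod c 13) (d.getD (PySem.Int.mod c 13) 0 + 1) else d)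
    PySem.Dict.empty
  let combo1 := rank_counts.items.foldl pvComboStep combo0
  let ranks := PySem.List.sorted rank_counts.keys (fun x => x) false
  let combo2 := pvStraightLoop ranks (PySem.List.pyRange 0 ((ranks.length : Int) - 4) 1) combo1
  combo2.items

-- ===== PORT B =====
def analyze_hand_combos_alt (hand : List Int) : List (String × Int) :=
  let cnt := (PySem.List.pyRange 0 13 1).map (fun r =>
      hand.foldl (fun s c => if 0 ≤ c ∧ c < 52 ∧ PySem.Int.mod c 13 = r then s + 1 else s) (0:Int))
  let atLeast := fun (t : Int) => cnt.foldl (fun s v => if v ≥ t then s + 1 else s) (0:Int)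
  let straight : Int := if (PySem.List.pyRange 0 9 1).any (fun r =>
      (PySem.List.pyRange 0 5 1).all (fun k => decide (PySem.List.pyGetD cnt (r+k) 0 > 0))) then 1 else 0
  [("single", atLeast 1), ("pair", atLeast 2), ("triple", atLeast 3), ("four_kind", atLeast 4),
   ("straight", straight), ("double_seq", 0)]

-- ===== PRECONDITION & SPEC =====
def Spec_analyze_hand_combos (hand : List Int) (out : List (String × Int)) : Prop := out = analyze_hand_combos_alt hand
instance (hand : List Int) (out : List (String × Int)) : Decidable (Spec_analyze_hand_combos hand out) := by unfold Spec_analyze_hand_combos; infer_instance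

-- ===== CLAIM (what is proved, stated in full; the proofs are below) =====
def Claim_equal_analyze_hand_combos : Prop := ∀ (hand : List Int), Dom_analyze_hand_combos hand → Spec_analyze_hand_combos hand (analyze_hand_combos hand)

-- ===== LEMMAS AND PROOFS =====

-- dict literal with the six fixed keys
def pvLit (s p t f g : Int) : PySem.Dict String Int :=
  PySem.Dict.mk [("single",s),("pair",p),("triple",t),("four_kind",f),("straight",g),("double_seq",0)]

theorem pvComboStep_lit (s p t f g : Int) (pr : Int × Int) :
    pvComboStep (pvLit s p t f g) pr =
      pvLit (s + if 1 ≤ pr.2 then 1 else 0) (p + if 2 ≤ pr.2 then 1 else 0)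
            (t + if 3 ≤ pr.2 then 1 else 0) (f + if 4 ≤ pr.2 then 1 else 0) g := by
  by_cases h1 : (1:Int) ≤ pr.2 <;> by_cases h2 : (2:Int) ≤ pr.2 <;> by_cases h3 : (3:Int) ≤ pr.2 <;>
    by_cases h4 : (4:Int) ≤ pr.2 <;>
    simp [pvComboStep, pvLit, h1, h2, h3, h4, ge_iff_le, PySem.Dict.insert, PySem.Dict.getD, PySem.Dict.get?]

theorem pvComboFold (l : List (Int × Int)) (s p t f g : Int) :
    l.foldl pvComboStep (pvLit s p t f g) =
      pvLit (s + (l.countP (fun pr => 1 ≤ pr.2) : Int)) (p + (l.countP (fun pr => 2 ≤ pr.2) : Int))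
            (t + (l.countP (fun pr => 3 ≤ pr.2) : Int)) (f + (l.countP (fun pr => 4 ≤ pr.2) : Int)) g := by
  induction l generalizing s p t f with
  | nil => simp
  | cons x xs ih =>
      simp only [List.foldl_cons, pvComboStep_lit, ih]
      simp only [pvLit, PySem.Dict.mk.injEq, List.cons.injEq, Prod.mk.injEq, and_true, true_and]
      and_intros <;> first
        | rfl
        | (rw [List.countP_cons]; push_cast; split_ifs <;> simp_all <;> omega)

theorem pvStraightLoop_eq (ranks : List Int) (l : List Int) (d : PySem.Dict String Int) :
    pvStraightLoop ranks l d =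
      if l.any (fun i => decide (PySem.List.pyGetD ranks (i+4) 0 - PySem.List.pyGetD ranks i 0 = 4)) then
        d.insert "straight" (d.getD "straight" 0 + 1)
      else d := by
  induction l with
  | nil => simp [pvStraightLoop]
  | cons x xs ih =>
      by_cases h : PySem.List.pyGetD ranks (x+4) 0 - PySem.List.pyGetD ranks x 0 = 4 <;>
        simp [pvStraightLoop, h, ih]

theorem pvInsertStraight_lit (s p t f g : Int) :
    (pvLit s p t f g).insert "straight" ((pvLit s p t f g).getD "straight" 0 + 1) = pvLit s p t f (g+1) := by
  simp [pvLit, PySem.Dict.insert, PySem.Dict.getD, PySem.Dict.get?]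

theorem pvCounterEq (hand : List Int) :
    hand.foldl (fun d c =>
      if 0 ≤ c ∧ c < 52 then d.insert (PySem.Int.mod c 13) (d.getD (PySem.Int.mod c 13) 0 + 1) else d)
      PySem.Dict.empty =
    PySem.Dict.counter ((hand.filter (fun c => decide (0 ≤ c ∧ c < 52))).map (fun c => PySem.Int.mod c 13)) := by
  rw [← PySem.Dict.foldl_insert_getD_add_one_eq_counter, List.foldl_map, List.foldl_filter]
  congr 1
  funext d c
  by_cases h : 0 ≤ c ∧ c < 52 <;> simp [h]

theorem pvFoldCount (hand : List Int) (r : Int) :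
    hand.foldl (fun s c => if 0 ≤ c ∧ c < 52 ∧ PySem.Int.mod c 13 = r then s + 1 else s) (0:Int) =
      (((hand.filter (fun c => decide (0 ≤ c ∧ c < 52))).map (fun c => PySem.Int.mod c 13)).count r : Int) := by
  rw [PySem.List.foldl_ite_add_one]
  norm_num
  rw [List.count_eq_countP, List.countP_map, List.countP_filter]
  refine List.countP_congr (fun c _ => ?_)
  simp only [Function.comp, beq_iff_eq, Bool.and_eq_true, decide_eq_true_eq]
  tauto

theorem pvCountPEq (xs : List Int) (hmem : ∀ x ∈ xs, 0 ≤ x ∧ x < 13) (t : Int) (ht : 1 ≤ t) :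
    ((PySem.Set.ofList xs).countP (fun k => t ≤ (xs.count k : Int)) : Int) =
    ((PySem.List.pyRange 0 13 1).countP (fun k => t ≤ (xs.count k : Int)) : Int) := by
  have h1 : List.Perm ((PySem.Set.ofList xs).filter (fun k => decide (t ≤ (xs.count k : Int))))
      ((PySem.List.pyRange 0 13 1).filter (fun k => decide (t ≤ (xs.count k : Int)))) := by
    rw [List.perm_ext_iff_of_nodup (List.Nodup.filter _ (PySem.Set.nodup_ofList xs))
        (List.Nodup.filter _ (PySem.List.nodup_pyRange_one 0 13))]
    intro a
    simp only [List.mem_filter, PySem.Set.mem_ofList, PySem.List.mem_pyRange_one, decide_eq_true_eq]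
    constructor
    · rintro ⟨ha, hc⟩; exact ⟨hmem a ha, hc⟩
    · rintro ⟨-, hc⟩
      have : 0 < xs.count a := by
        by_contra h
        simp only [Nat.pos_iff_ne_zero, ne_eq, not_not] at h
        rw [h] at hc; push_cast at hc; omega
      exact ⟨List.count_pos_iff.mp this, hc⟩
  rw [List.countP_eq_length_filter, List.countP_eq_length_filter, h1.length_eq]

theorem pvGap (L : List Int) (hmono : L.Pairwise (· < ·)) :
    ∀ (i k : ℕ) (h : i + k < L.length), L[i]'(by omega) + k ≤ L[i + k]'h := by
  have hm := List.pairwise_iff_getElem.mp hmono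
  intro i k
  induction k with
  | zero => intro h; simp
  | succ k ih =>
      intro h
      have h' : i + k < L.length := by omega
      have := ih h'
      have hlt : L[i + k]'h' < L[i + k + 1]'(by omega) := hm _ _ h' (by omega) (by omega)
      have hee : L[i + (k + 1)]'h = L[i + k + 1]'(by omega) := rfl
      rw [hee]
      push_cast
      omega

theorem pvMonoLe (L : List Int) (hmono : L.Pairwise (· < ·)) (i j : ℕ) (hi : i < L.length)
    (hj : j < L.length) (hij : i ≤ j) : L[i] ≤ L[j] := by
  rcases Nat.lt_or_ge i j with h | h
  · exact le_of_lt (List.pairwise_iff_getElem.mp hmono i j hi hj h)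
  · have : i = j := by omega
    subst this; rfl

theorem pvStraightIff (L : List Int) (hmono : L.Pairwise (· < ·))
    (hbd : ∀ x ∈ L, 0 ≤ x ∧ x < 13) :
    (∃ (i : ℕ) (h : i + 4 < L.length), L[i + 4]'h - L[i]'(by omega) = 4) ↔
    (∃ r : Int, 0 ≤ r ∧ r < 9 ∧ ∀ k : Int, 0 ≤ k → k < 5 → (r + k) ∈ L) := by
  have hm := List.pairwise_iff_getElem.mp hmono
  constructor
  · rintro ⟨i, h, he⟩
    refine ⟨L[i]'(by omega), (hbd _ (List.getElem_mem _)).1, ?_, ?_⟩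
    · have := (hbd (L[i + 4]'h) (List.getElem_mem _)).2
      omega
    · intro k hk0 hk5
      have hk : k.toNat ≤ 4 := by omega
      have h1 : i + k.toNat < L.length := by omega
      have hlow := pvGap L hmono i k.toNat h1
      have hup := pvGap L hmono (i + k.toNat) (4 - k.toNat) (by omega)
      rw [show ∀ (h2 : (i + k.toNat) + (4 - k.toNat) < L.length),
          L[(i + k.toNat) + (4 - k.toNat)]'h2 = L[i + 4]'h from by
            intro h2; congr 1; omega] at hup
      have heq : L[i + k.toNat]'h1 = L[i]'(by omega) + k := by push_cast at hlow hup ⊢; omega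
      rw [← heq]
      exact List.getElem_mem _
  · rintro ⟨r, hr0, hr9, hall⟩
    obtain ⟨i0, g0, e0⟩ := List.mem_iff_getElem.mp (by simpa using hall 0 (by omega) (by omega))
    obtain ⟨i1, g1, e1⟩ := List.mem_iff_getElem.mp (hall 1 (by omega) (by omega))
    obtain ⟨i2, g2, e2⟩ := List.mem_iff_getElem.mp (hall 2 (by omega) (by omega))
    obtain ⟨i3, g3, e3⟩ := List.mem_iff_getElem.mp (hall 3 (by omega) (by omega))
    obtain ⟨i4, g4, e4⟩ := List.mem_iff_getElem.mp (hall 4 (by omega) (by omega))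
    have o01 : i0 < i1 := by
      by_contra hc
      have := pvMonoLe L hmono i1 i0 g1 g0 (by omega)
      omega
    have o12 : i1 < i2 := by
      by_contra hc
      have := pvMonoLe L hmono i2 i1 g2 g1 (by omega)
      omega
    have o23 : i2 < i3 := by
      by_contra hc
      have := pvMonoLe L hmono i3 i2 g3 g2 (by omega)
      omega
    have o34 : i3 < i4 := by
      by_contra hc
      have := pvMonoLe L hmono i4 i3 g4 g3 (by omega)
      omega
    have hlen : i0 + 4 < L.length := by omega
    refine ⟨i0, hlen, ?_⟩
    have hlow := pvGap L hmono i0 4 hlen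
    have hup := pvMonoLe L hmono (i0 + 4) i4 hlen g4 (by omega)
    push_cast at hlow
    omega

-- membership bounds of the canonical rank list
theorem pvXsBounds (hand : List Int) :
    ∀ x ∈ (hand.filter (fun c => decide (0 ≤ c ∧ c < 52))).map (fun c => PySem.Int.mod c 13),
      0 ≤ x ∧ x < 13 := by
  intro x hx
  obtain ⟨c, -, rfl⟩ := List.mem_map.mp hx
  rw [PySem.Int.mod_eq_emod_of_pos (by norm_num)]
  exact ⟨Int.emod_nonneg c (by norm_num), Int.emod_lt_of_pos c (by norm_num)⟩

-- per-threshold count equality, Nat level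
theorem pvThreshold (xs : List Int) (hmem : ∀ x ∈ xs, 0 ≤ x ∧ x < 13) (t : Int) (ht : 1 ≤ t) :
    ((PySem.Set.ofList xs).map (fun k => (k, (xs.count k : Int)))).countP (fun pr => decide (t ≤ pr.2)) =
    ((PySem.List.pyRange 0 13 1).map (fun r => (xs.count r : Int))).countP (fun v => decide (v ≥ t)) := by
  rw [List.countP_map, List.countP_map]
  have h := pvCountPEq xs hmem t ht
  have h' : (PySem.Set.ofList xs).countP (fun k => decide (t ≤ (xs.count k : Int))) =
      (PySem.List.pyRange 0 13 1).countP (fun k => decide (t ≤ (xs.count k : Int))) := by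
    exact_mod_cast h
  simpa [Function.comp, ge_iff_le] using h'

-- the two straight tests agree
theorem pvStraightBool (xs : List Int) (hmem : ∀ x ∈ xs, 0 ≤ x ∧ x < 13) :
    ((PySem.List.pyRange 0 ((((PySem.List.sorted (PySem.Set.ofList xs) (fun x => x) false).length : Int)) - 4) 1).any fun i =>
        decide (PySem.List.pyGetD (PySem.List.sorted (PySem.Set.ofList xs) (fun x => x) false) (i + 4) 0 -
          PySem.List.pyGetD (PySem.List.sorted (PySem.Set.ofList xs) (fun x => x) false) i 0 = 4)) =
    ((PySem.List.pyRange 0 9 1).any fun r =>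
        (PySem.List.pyRange 0 5 1).all fun k =>
          decide (PySem.List.pyGetD ((PySem.List.pyRange 0 13 1).map (fun r => (xs.count r : Int))) (r + k) 0 > 0)) := by
  set L := PySem.List.sorted (PySem.Set.ofList xs) (fun x => x) false with hL
  have hmono : L.Pairwise (· < ·) := PySem.List.sorted_ofList_pairwise_lt xs
  have hmemL : ∀ x : Int, x ∈ L ↔ x ∈ xs := fun x => by
    rw [hL, PySem.List.mem_sorted, PySem.Set.mem_ofList]
  have hbd : ∀ x ∈ L, 0 ≤ x ∧ x < 13 := fun x hx => hmem x ((hmemL x).mp hx)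
  rw [Bool.eq_iff_iff]
  simp only [List.any_eq_true, List.all_eq_true, PySem.List.mem_pyRange_one, decide_eq_true_eq]
  constructor
  · rintro ⟨i, ⟨hi0, hi⟩, he⟩
    have hlen : i.toNat + 4 < L.length := by omega
    have e1 : PySem.List.pyGetD L i 0 = L[i.toNat]'(by omega) :=
      PySem.List.pyGetD_eq_getElem L 0 hi0 (by omega)
    have e2 : PySem.List.pyGetD L (i + 4) 0 = L[(i+4).toNat]'(by omega) :=
      PySem.List.pyGetD_eq_getElem L 0 (by omega) (by omega)
    have e3 : L[(i+4).toNat]'(by omega) = L[i.toNat + 4]'hlen := by congr 1; omega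
    obtain ⟨r, hr0, hr9, hall⟩ := (pvStraightIff L hmono hbd).mp
      ⟨i.toNat, hlen, by rw [← e3, ← e2, ← e1]; exact he⟩
    refine ⟨r, ⟨hr0, hr9⟩, fun k hk => ?_⟩
    have hmemx : (r + k) ∈ xs := (hmemL _).mp (hall k hk.1 hk.2)
    rw [PySem.List.pyGetD_map_pyRange_of_nonneg _ 13 _ 0 (by omega)
      (by have := hmem _ hmemx; omega)]
    exact_mod_cast List.count_pos_iff.mpr hmemx
  · rintro ⟨r, ⟨hr0, hr9⟩, hall⟩
    have hall' : ∀ k : Int, 0 ≤ k → k < 5 → (r + k) ∈ L := by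
      intro k hk0 hk5
      have := hall k ⟨hk0, hk5⟩
      rw [PySem.List.pyGetD_map_pyRange_of_nonneg _ 13 _ 0 (by omega) (by omega)] at this
      have : 0 < xs.count (r + k) := by exact_mod_cast this
      exact (hmemL _).mpr (List.count_pos_iff.mp this)
    obtain ⟨i, h, he⟩ := (pvStraightIff L hmono hbd).mpr ⟨r, hr0, hr9, hall'⟩
    refine ⟨(i : Int), ⟨by omega, by omega⟩, ?_⟩
    have e1 : PySem.List.pyGetD L (i : Int) 0 = L[i]'(by omega) := by
      rw [PySem.List.pyGetD_eq_getElem L 0 (by omega) (by omega)]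
      congr 1
    have e2 : PySem.List.pyGetD L ((i : Int) + 4) 0 = L[i + 4]'h := by
      rw [PySem.List.pyGetD_eq_getElem L 0 (by omega) (by omega)]
      congr 1
    rw [e1, e2]; exact he

-- ===== VERDICT (by name: the statement is the Claim_ definition above) =====
theorem analyze_hand_combos_spec : Claim_equal_analyze_hand_combos := by
  intro hand _
  unfold Spec_analyze_hand_combos analyze_hand_combos analyze_hand_combos_alt
  simp only [pvCounterEq, pvFoldCount]
  set xs := (hand.filter (fun c => decide (0 ≤ c ∧ c < 52))).map (fun c => PySem.Int.mod c 13) with hxs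
  have hmem := pvXsBounds hand
  rw [← hxs] at hmem
  have hlit : PySem.Dict.ofList
      [("single",(0:Int)),("pair",(0:Int)),("triple",(0:Int)),("four_kind",(0:Int)),("straight",(0:Int)),("double_seq",(0:Int))] =
      pvLit 0 0 0 0 0 := by rfl
  rw [hlit, PySem.Dict.items_counter, pvComboFold, PySem.Dict.keys_counter, pvStraightLoop_eq]
  rw [pvStraightBool xs hmem]
  simp only [PySem.List.foldl_ite_add_one]
  rw [pvThreshold xs hmem 1 (by norm_num), pvThreshold xs hmem 2 (by norm_num),
      pvThreshold xs hmem 3 (by norm_num), pvThreshold xs hmem 4 (by norm_num)]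
  split_ifs with hb
  · rw [pvInsertStraight_lit]
    simp [pvLit]
  · simp [pvLit]
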